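-- pv_equiv track=rewrite | github.com/ConAltDelete/AdventOfCodeConAltDelete | mics/aux_functions.py | permute_count
-- ===== SOURCE A (Python) =====
-- def permute_count(left_list:list[tuple[int,int]],right_list:list[tuple[int,int]]) -> int:
--     """
--         Goes trough all possible permutations of the left and right list and checks if they are valid.
--         strategy:
--             - sort both lists
--             - iterate through the left list
--             - since both lists are sorted we can iterate through the left list and slowly iterate thought the right list until we find a value equal to or greater than the left value
--             - if we reach the end of the right list and we haven't found a higher value -> break the loop
--     """
--     #count = sum(left <= right for left in left_list for right in right_list)
--     count = 0
--     left_list.sort()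
--     right_list.sort()
--     r_i = 0
--     right = right_list[r_i]
--     for left in range(len(left_list)):
--         while left_list[left] > right and r_i < len(right_list)-1:
--             r_i += 1
--             right = right_list[r_i]
--
--         if r_i == len(right_list)-1 and left_list[left] > right:
--             break
--
--         count += len(right_list) - r_i
--     return count
-- ===== SOURCE B (Python) =====
-- def permute_count(left_list: list[tuple[int, int]], right_list: list[tuple[int, int]]) -> int:
--     """Count pairs (left, right) with left <= right: sort both lists in place,
--     then for each left element binary-search the first right >= left and add
--     the number of remaining right elements."""
--     left_list.sort()
--     right_list.sort()
--     n = len(right_list)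
--     total = 0
--     for left in left_list:
--         lo, hi = 0, n
--         while lo < hi:
--             mid = (lo + hi) // 2
--             if right_list[mid] < left:
--                 lo = mid + 1
--             else:
--                 hi = mid
--         total += n - lo
--     return total
-- ===== Notes on version B (the rewrite author's own statement) =====
-- stated objective: alternative
-- what changed: Replaces A's single stateful two-pointer sweep (with its mid-loop break and carried right-pointer state) by an independent per-left-element binary search over the sorted right list, summing len(right_list) minus the insertion point.
import Mathlib
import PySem

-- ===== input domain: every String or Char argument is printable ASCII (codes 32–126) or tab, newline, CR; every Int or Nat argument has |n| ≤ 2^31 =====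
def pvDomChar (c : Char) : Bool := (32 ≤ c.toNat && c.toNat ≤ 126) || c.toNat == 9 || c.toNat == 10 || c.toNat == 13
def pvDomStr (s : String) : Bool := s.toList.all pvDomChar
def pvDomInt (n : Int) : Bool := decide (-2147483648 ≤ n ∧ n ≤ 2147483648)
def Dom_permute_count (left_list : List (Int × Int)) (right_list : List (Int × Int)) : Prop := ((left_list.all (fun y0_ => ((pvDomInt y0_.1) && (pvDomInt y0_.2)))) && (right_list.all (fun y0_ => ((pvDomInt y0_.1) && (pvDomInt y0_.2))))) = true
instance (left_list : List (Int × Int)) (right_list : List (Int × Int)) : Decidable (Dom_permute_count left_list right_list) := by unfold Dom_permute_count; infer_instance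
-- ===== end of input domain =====

-- B replaces A's stateful two-pointer sweep by an independent binary search per left element
-- (objective: alternative). Both A and B sort both argument lists in place; the equivalence
-- proved here is about the RETURN value (B performs the same in-place sorts).
-- Python tuple comparison is lexicographic: both ports compare via `toLex : Int × Int → Lex (Int × Int)`,
-- whose `<`/`≤` are exactly Python's `<`/`<=` on 2-tuples of ints, and sort with that key
-- (stable, key injective), which is exactly `list.sort()` on tuples.

-- ===== PORT A =====
-- the `while left_list[left] > right and r_i < len(right_list)-1:` loop; indices are always
-- in range when read (r_i+1 ≤ len-1), so `getD` is exact for Python's `right_list[r_i]`;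
-- `fuel` only makes the recursion structural — called with fuel ≥ len(right_list)-1-r_i it never runs out
def pvWhileA (R : List (Int × Int)) (l : Int × Int) :
    Nat → Nat → (Int × Int) → Nat × (Int × Int)
  | 0, r_i, right => (r_i, right)
  | fuel + 1, r_i, right =>
    if toLex right < toLex l ∧ r_i < R.length - 1 then
      pvWhileA R l fuel (r_i + 1) (R.getD (r_i + 1) (0, 0))
    else (r_i, right)

-- the `for left in range(len(left_list)):` loop over the sorted left list, with A's break
def pvLoopA (R : List (Int × Int)) (r_i : Nat) (right : Int × Int) (count : Int) :
    List (Int × Int) → Int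
  | [] => count
  | l :: rest =>
    let s := pvWhileA R l R.length r_i right
    if s.1 = R.length - 1 ∧ toLex s.2 < toLex l then count
    else pvLoopA R s.1 s.2 (count + ((R.length : Int) - (s.1 : Int))) rest

def permute_count (left_list : List (Int × Int)) (right_list : List (Int × Int)) : Int :=
  let Ls := PySem.List.sorted left_list (fun p => toLex p)
  let Rs := PySem.List.sorted right_list (fun p => toLex p)
  match PySem.List.pyGet? Rs (0 : Int) with
  | none => 0  -- Python raises IndexError here (`right = right_list[0]` on empty list); excluded by Pre_
  | some right => pvLoopA Rs 0 right 0 Ls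

-- ===== PORT B =====
-- Source B's hand-written bisect_left: `while lo < hi: mid = (lo+hi)//2; ...`; lo, hi, mid are
-- nonnegative so Nat `/` is Python's `//`, and `mid < hi ≤ len` so `getD` is exact for `right_list[mid]`;
-- `fuel` only makes the recursion structural — called with fuel ≥ hi - lo it never runs out
def pvBisect (R : List (Int × Int)) (l : Int × Int) :
    Nat → Nat → Nat → Nat
  | 0, lo, _hi => lo
  | fuel + 1, lo, hi =>
    if lo < hi then
      let mid := (lo + hi) / 2
      if toLex (R.getD mid (0, 0)) < toLex l then pvBisect R l fuel (mid + 1) hi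
      else pvBisect R l fuel lo mid
    else lo

def permute_count_alt (left_list : List (Int × Int)) (right_list : List (Int × Int)) : Int :=
  let Ls := PySem.List.sorted left_list (fun p => toLex p)
  let Rs := PySem.List.sorted right_list (fun p => toLex p)
  let n := Rs.length
  Ls.foldl (fun total l => total + ((n : Int) - (pvBisect Rs l n 0 n : Int))) 0

-- ===== PRECONDITION & SPEC =====
-- A reads right_list[0] before its loop, so it raises IndexError iff right_list is empty
def Pre_permute_count (left_list : List (Int × Int)) (right_list : List (Int × Int)) : Prop :=
  right_list ≠ []
instance (left_list : List (Int × Int)) (right_list : List (Int × Int)) :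
    Decidable (Pre_permute_count left_list right_list) := by unfold Pre_permute_count; infer_instance

def pvWitness_permute_count : (List (Int × Int)) × (List (Int × Int)) := ([(1, 2)], [(0, 1)])

def Spec_permute_count (left_list : List (Int × Int)) (right_list : List (Int × Int)) (out : Int) : Prop :=
  out = permute_count_alt left_list right_list
instance (left_list : List (Int × Int)) (right_list : List (Int × Int)) (out : Int) :
    Decidable (Spec_permute_count left_list right_list out) := by unfold Spec_permute_count; infer_instance

-- ===== CLAIM (what is proved, stated in full; the proofs are below) =====
def Claim_equal_permute_count : Prop := ∀ (left_list : List (Int × Int)) (right_list : List (Int × Int)), Dom_permute_count left_list right_list → Pre_permute_count left_list right_list → Spec_permute_count left_list right_list (permute_count left_list right_list)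

-- ===== LEMMAS AND PROOFS =====

-- number of elements of R strictly below l in Python's (lexicographic) tuple order
def pvCnt (R : List (Int × Int)) (l : Int × Int) : Nat :=
  R.countP (fun r => decide (toLex r < toLex l))

theorem pvCnt_le_length (R : List (Int × Int)) (l : Int × Int) : pvCnt R l ≤ R.length :=
  List.countP_le_length

theorem pvCnt_mono (R : List (Int × Int)) {l l' : Int × Int} (h : toLex l ≤ toLex l') :
    pvCnt R l ≤ pvCnt R l' := by
  apply List.countP_mono_left
  intro r _ hr
  simp only [decide_eq_true_eq] at hr ⊢
  exact lt_of_lt_of_le hr h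

-- boundary characterisation of pvCnt on a sorted list, in getD form
theorem pvCB (R : List (Int × Int)) (l : Int × Int)
    (hpw : R.Pairwise (fun a b => toLex a ≤ toLex b)) :
    ∀ j, j < R.length → (toLex (R.getD j (0, 0)) < toLex l ↔ j < pvCnt R l) := by
  induction R with
  | nil => intro j hj; simp at hj
  | cons x R ih =>
    rw [List.pairwise_cons] at hpw
    obtain ⟨hx, hpw'⟩ := hpw
    intro j hj
    by_cases hxl : toLex x < toLex l
    · have hstep : pvCnt (x :: R) l = pvCnt R l + 1 := by
        simp [pvCnt, hxl]
      cases j with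
      | zero => rw [List.getD_cons_zero, hstep]; simp [hxl]
      | succ k =>
        have hk : k < R.length := by simpa using hj
        rw [List.getD_cons_succ, ih hpw' k hk, hstep]
        omega
    · have h0 : pvCnt R l = 0 := by
        apply List.countP_eq_zero.mpr
        intro r hr
        simp only [decide_eq_true_eq]
        intro hrl
        exact hxl (lt_of_le_of_lt (hx r hr) hrl)
      have htot : pvCnt (x :: R) l = 0 := by
        simp only [pvCnt, List.countP_cons] at h0 ⊢
        simp [hxl, h0]
      rw [htot]
      cases j with
      | zero => rw [List.getD_cons_zero]; simpa using hxl
      | succ k =>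
        have hk : k < R.length := by simpa using hj
        rw [List.getD_cons_succ]
        have hmem : R.getD k (0, 0) ∈ R := by
          rw [List.getD_eq_getElem R (0, 0) hk]
          exact List.getElem_mem hk
        constructor
        · intro hlt; exact absurd (lt_of_le_of_lt (hx _ hmem) hlt) hxl
        · omega

-- monotonicity of getD along a sorted list
theorem pvMono (R : List (Int × Int))
    (hpw : R.Pairwise (fun a b => toLex a ≤ toLex b)) :
    ∀ i j, i ≤ j → j < R.length →
      toLex (R.getD i (0, 0)) ≤ toLex (R.getD j (0, 0)) := by
  intro i j hij hj
  rcases eq_or_lt_of_le hij with rfl | hlt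
  · exact le_refl _
  · rw [List.getD_eq_getElem R (0, 0) (by omega), List.getD_eq_getElem R (0, 0) hj]
    exact List.pairwise_iff_getElem.mp hpw i j (by omega) hj hlt

-- uniqueness of the pvCnt boundary on a sorted list
theorem pvBoundary (R : List (Int × Int)) (l : Int × Int)
    (hpw : R.Pairwise (fun a b => toLex a ≤ toLex b)) (k : Nat) (hk : k ≤ R.length)
    (hlow : ∀ j, j < k → toLex (R.getD j (0, 0)) < toLex l)
    (hhigh : ∀ j, k ≤ j → j < R.length → ¬ toLex (R.getD j (0, 0)) < toLex l) :
    k = pvCnt R l := by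
  have hc := pvCnt_le_length R l
  by_contra hne
  rcases Nat.lt_or_ge (pvCnt R l) k with hlo | hlo
  · have hltc := hlow (pvCnt R l) hlo
    have := (pvCB R l hpw (pvCnt R l) (by omega)).mp hltc
    omega
  · have hlo' : k < pvCnt R l := by omega
    exact hhigh k (le_refl k) (by omega) ((pvCB R l hpw k (by omega)).mpr hlo')

-- pvBisect's result is the pvCnt boundary on a sorted list
theorem pvBisect_spec (R : List (Int × Int)) (l : Int × Int)
    (hpw : R.Pairwise (fun a b => toLex a ≤ toLex b)) :
    ∀ fuel lo hi, hi - lo ≤ fuel → lo ≤ hi → hi ≤ R.length →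
      (∀ j, j < lo → toLex (R.getD j (0, 0)) < toLex l) →
      (∀ j, hi ≤ j → j < R.length → ¬ toLex (R.getD j (0, 0)) < toLex l) →
      pvBisect R l fuel lo hi = pvCnt R l := by
  intro fuel
  induction fuel with
  | zero =>
    intro lo hi hf hlh hhn hlow hhigh
    simp only [pvBisect]
    exact pvBoundary R l hpw lo (by omega) hlow (fun j hj hjn => hhigh j (by omega) hjn)
  | succ fuel ih =>
    intro lo hi hf hlh hhn hlow hhigh
    simp only [pvBisect]
    by_cases hlt : lo < hi
    · rw [if_pos hlt]
      by_cases hmid : toLex (R.getD ((lo + hi) / 2) (0, 0)) < toLex l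
      · rw [if_pos hmid]
        refine ih ((lo + hi) / 2 + 1) hi (by omega) (by omega) hhn ?_ hhigh
        intro j hj
        rcases Nat.lt_or_ge j lo with hjlo | hjlo
        · exact hlow j hjlo
        · exact lt_of_le_of_lt (pvMono R hpw j ((lo + hi) / 2) (by omega) (by omega)) hmid
      · rw [if_neg hmid]
        refine ih lo ((lo + hi) / 2) (by omega) (by omega) (by omega) hlow ?_
        intro j hj hjn hjl
        exact hmid (lt_of_le_of_lt (pvMono R hpw ((lo + hi) / 2) j hj hjn) hjl)
    · rw [if_neg hlt]
      exact pvBoundary R l hpw lo (by omega) hlow (fun j hj hjn => hhigh j (by omega) hjn)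

-- a stopped while-state is the min (pvCnt) (len-1) boundary state
theorem pvWhileStopped (R : List (Int × Int)) (l : Int × Int)
    (hpw : R.Pairwise (fun a b => toLex a ≤ toLex b)) (r_i : Nat) (right : Int × Int)
    (hrn : r_i < R.length) (hright : right = R.getD r_i (0, 0)) (hle : r_i ≤ pvCnt R l)
    (hstop : ¬ toLex right < toLex l ∨ r_i = R.length - 1) :
    (r_i, right) =
      (min (pvCnt R l) (R.length - 1), R.getD (min (pvCnt R l) (R.length - 1)) (0, 0)) := by
  by_cases h1 : toLex right < toLex l
  · have h2 : r_i = R.length - 1 := by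
      rcases hstop with h | h
      · exact absurd h1 h
      · exact h
    have h3 : r_i < pvCnt R l := (pvCB R l hpw r_i hrn).mp (hright ▸ h1)
    have h4 := pvCnt_le_length R l
    have h5 : min (pvCnt R l) (R.length - 1) = r_i := by omega
    rw [h5, hright]
  · have h2 : pvCnt R l ≤ r_i := by
      by_contra h
      rw [hright] at h1
      exact h1 ((pvCB R l hpw r_i hrn).mpr (by omega))
    have h5 : min (pvCnt R l) (R.length - 1) = r_i := by omega
    rw [h5, hright]

-- pvWhileA advances r_i to min (pvCnt R l) (R.length - 1) on a sorted list
theorem pvWhileA_spec (R : List (Int × Int)) (l : Int × Int)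
    (hpw : R.Pairwise (fun a b => toLex a ≤ toLex b)) :
    ∀ fuel r_i right, R.length - 1 - r_i ≤ fuel → r_i < R.length →
      right = R.getD r_i (0, 0) → r_i ≤ pvCnt R l →
      pvWhileA R l fuel r_i right =
        (min (pvCnt R l) (R.length - 1), R.getD (min (pvCnt R l) (R.length - 1)) (0, 0)) := by
  intro fuel
  induction fuel with
  | zero =>
    intro r_i right hf hrn hright hle
    simp only [pvWhileA]
    exact pvWhileStopped R l hpw r_i right hrn hright hle (Or.inr (by omega))
  | succ fuel ih =>
    intro r_i right hf hrn hright hle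
    simp only [pvWhileA]
    by_cases hcond : toLex right < toLex l ∧ r_i < R.length - 1
    · rw [if_pos hcond]
      have hlt : r_i < pvCnt R l := (pvCB R l hpw r_i hrn).mp (hright ▸ hcond.1)
      exact ih (r_i + 1) _ (by omega) (by omega) rfl (by omega)
    · rw [if_neg hcond]
      apply pvWhileStopped R l hpw r_i right hrn hright hle
      by_cases h1 : toLex right < toLex l
      · rcases Nat.lt_or_ge r_i (R.length - 1) with h | h
        · exact absurd ⟨h1, h⟩ hcond
        · right; omega
      · left; exact h1

theorem pvLoopA_spec (R : List (Int × Int))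
    (hpw : R.Pairwise (fun a b => toLex a ≤ toLex b)) :
    ∀ rest, rest.Pairwise (fun a b => toLex a ≤ toLex b) →
      ∀ r_i right count, r_i < R.length → right = R.getD r_i (0, 0) →
        (∀ l ∈ rest, r_i ≤ pvCnt R l) →
        pvLoopA R r_i right count rest =
          count + (rest.map (fun l => (R.length : Int) - (pvCnt R l : Int))).sum := by
  intro rest
  induction rest with
  | nil => intro _ r_i right count _ _ _; simp [pvLoopA]
  | cons l rest ih =>
    intro hpwrest r_i right count hrn hright hle
    rw [List.pairwise_cons] at hpwrest
    obtain ⟨hll, hpr⟩ := hpwrest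
    have hW := pvWhileA_spec R l hpw R.length r_i right (by omega) hrn hright
      (hle l List.mem_cons_self)
    simp only [pvLoopA, hW]
    by_cases hbr : min (pvCnt R l) (R.length - 1) = R.length - 1 ∧
        toLex (R.getD (min (pvCnt R l) (R.length - 1)) (0, 0)) < toLex l
    · rw [if_pos hbr]
      have hcn : pvCnt R l = R.length := by
        obtain ⟨hb1, hb2⟩ := hbr
        rw [hb1] at hb2
        have := (pvCB R l hpw (R.length - 1) (by omega)).mp hb2
        have := pvCnt_le_length R l
        omega
      have hz : ∀ x ∈ (l :: rest).map (fun l' => (R.length : Int) - (pvCnt R l' : Int)), x = 0 := by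
        intro x hx
        simp only [List.mem_map] at hx
        obtain ⟨l', hl', rfl⟩ := hx
        have hmon : pvCnt R l ≤ pvCnt R l' := by
          rcases List.mem_cons.mp hl' with rfl | hmem
          · exact le_refl _
          · exact pvCnt_mono R (hll l' hmem)
        have hub := pvCnt_le_length R l'
        have : pvCnt R l' = R.length := by omega
        rw [this]
        omega
      rw [List.sum_eq_zero hz]
      ring
    · rw [if_neg hbr]
      have hclt : pvCnt R l < R.length := by
        by_contra h
        rw [Nat.not_lt] at h
        have hceq : pvCnt R l = R.length := le_antisymm (pvCnt_le_length R l) h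
        apply hbr
        have hmineq : min (pvCnt R l) (R.length - 1) = R.length - 1 := by omega
        refine ⟨hmineq, ?_⟩
        rw [hmineq]
        exact (pvCB R l hpw (R.length - 1) (by omega)).mpr (by omega)
      have hmineq : min (pvCnt R l) (R.length - 1) = pvCnt R l := by omega
      rw [hmineq]
      rw [ih hpr (pvCnt R l) _ _ hclt rfl
        (fun l' hl' => pvCnt_mono R (hll l' hl'))]
      simp only [List.map_cons, List.sum_cons]
      ring

-- ===== VERDICT (by name: the statement is the Claim_ definition above) =====
theorem permute_count_spec : Claim_equal_permute_count := by
  intro L R hdom hpre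
  unfold Spec_permute_count permute_count permute_count_alt
  simp only []
  have hpwR := PySem.List.sorted_pairwise R (fun p : Int × Int => (toLex p : Lex (Int × Int)))
  have hpwL := PySem.List.sorted_pairwise L (fun p : Int × Int => (toLex p : Lex (Int × Int)))
  set Rs := PySem.List.sorted R (fun p : Int × Int => toLex p) with hRs
  set Ls := PySem.List.sorted L (fun p : Int × Int => toLex p) with hLs
  have hRne : Rs ≠ [] := by
    intro h
    have hp := PySem.List.sorted_perm R (fun p : Int × Int => (toLex p : Lex (Int × Int))) false
    rw [← hRs, h] at hp
    exact hpre (List.nil_perm.mp hp)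
  obtain ⟨r0, t, hcons⟩ := List.exists_cons_of_ne_nil hRne
  have hget : PySem.List.pyGet? Rs (0 : Int) = some r0 := by
    rw [hcons]; exact PySem.List.pyGet?_zero_cons r0 t
  rw [hget]
  show pvLoopA Rs 0 r0 0 Ls =
    List.foldl (fun total l => total + ((Rs.length : Int) - (pvBisect Rs l Rs.length 0 Rs.length : Int))) 0 Ls
  have hlen : 0 < Rs.length := by rw [hcons]; simp
  have hr0 : r0 = Rs.getD 0 (0, 0) := by rw [hcons]; simp
  rw [pvLoopA_spec Rs hpwR Ls hpwL 0 r0 0 hlen hr0 (fun _ _ => Nat.zero_le _)]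
  rw [PySem.List.foldl_add (g := fun l => (Rs.length : Int) - (pvBisect Rs l Rs.length 0 Rs.length : Int))]
  have hb : ∀ l, pvBisect Rs l Rs.length 0 Rs.length = pvCnt Rs l := fun l =>
    pvBisect_spec Rs l hpwR Rs.length 0 Rs.length (by omega) (Nat.zero_le _) (le_refl _)
      (fun j hj => absurd hj (Nat.not_lt_zero j))
      (fun j hj hjn => absurd (lt_of_le_of_lt hj hjn) (lt_irrefl _))
  simp only [hb]
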